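-- pv_equiv track=rewrite | github.com/janrito/rbtr | src/rbtr/engine/tools.py | _grep_lines
-- ===== SOURCE A (Python) =====
-- def _limited(shown: int, total: int, *, hint: str) -> str:
--     """Standard truncation trailer appended when output is capped.
--
--     Every tool that caps output uses this, so the LLM sees a
--     consistent format and knows how to request more.
--     """
--     return f"\n\n... limited ({shown}/{total}). {hint}"
--
-- def _number_lines(lines: list[str], start: int) -> str:
--     """Format *lines* with right-aligned line numbers starting at *start*."""
--     end = start + len(lines)
--     width = len(str(end))
--     return "\n".join(f"{start + i:{width}d}│ {line}" for i, line in enumerate(lines))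
--
-- def _grep_lines(
--     all_lines: list[str], path: str, needle: str, ctx_n: int, offset: int, max_hits: int
-- ) -> str:
--     """Search *all_lines* for *needle*, returning formatted matches with context."""
--     total = len(all_lines)
--     match_indices = [i for i, line in enumerate(all_lines) if needle in line.lower()]
--     if not match_indices:
--         return f"No matches for '{needle}' in '{path}'."
--
--     # Build merged context regions.
--     regions: list[tuple[int, int]] = []
--     for idx in match_indices:
--         region_start = max(idx - ctx_n, 0)
--         region_end = min(idx + ctx_n + 1, total)
--         if regions and region_start <= regions[-1][1]:
--             regions[-1] = (regions[-1][0], region_end)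
--         else:
--             regions.append((region_start, region_end))
--
--     # Paginate by match group (region).
--     total_groups = len(regions)
--     page = regions[offset : offset + max_hits]
--     if not page:
--         return f"Offset {offset} exceeds {total_groups} match groups."
--
--     n_matches = len(match_indices)
--     header = f"# {path}  ({n_matches} match{'es' if n_matches != 1 else ''})"
--     sections: list[str] = [header]
--     for region_start, region_end in page:
--         sections.append(_number_lines(all_lines[region_start:region_end], region_start + 1))
--
--     result = "\n\n".join(sections)
--     shown = offset + len(page)
--     if shown < total_groups:
--         result += _limited(shown, total_groups, hint=f"offset={shown} to see more match groups")
--     return result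
-- ===== SOURCE B (Python) =====
-- # Alternative decomposition: match indices collected with an explicit counter loop,
-- # regions built front-to-back by a two-pointer scan that extends each cluster while
-- # the next match is within 2*ctx_n+1 lines (instead of A's merge-with-last-region
-- # rewriting), lines numbered with str.rjust in an explicit loop, and the result
-- # string grown by concatenation instead of joining a sections list.
--
-- def _number_block(lines, start):
--     width = len(str(start + len(lines)))
--     rows = []
--     n = start
--     for line in lines:
--         rows.append(str(n).rjust(width) + "\u2502 " + line)
--         n += 1
--     return "\n".join(rows)
--
--
-- def _grep_lines(
--     all_lines: list[str], path: str, needle: str, ctx_n: int, offset: int, max_hits: int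
-- ) -> str:
--     total = len(all_lines)
--     match_indices = []
--     i = 0
--     for line in all_lines:
--         if needle in line.lower():
--             match_indices.append(i)
--         i += 1
--     n_matches = len(match_indices)
--     if n_matches == 0:
--         return "No matches for '" + needle + "' in '" + path + "'."
--
--     # Two-pointer scan: each cluster of matches within 2*ctx_n+1 of each other
--     # yields exactly one clamped context region, emitted front-to-back.
--     regions = []
--     i = 0
--     while i < n_matches:
--         first = match_indices[i]
--         j = i
--         while j + 1 < n_matches and match_indices[j + 1] - match_indices[j] <= 2 * ctx_n + 1:
--             j += 1
--         last = match_indices[j]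
--         regions.append((max(first - ctx_n, 0), min(last + ctx_n + 1, total)))
--         i = j + 1
--
--     total_groups = len(regions)
--     page = regions[offset : offset + max_hits]
--     if not page:
--         return "Offset " + str(offset) + " exceeds " + str(total_groups) + " match groups."
--
--     result = "# " + path + "  (" + str(n_matches) + " match" + ("es" if n_matches != 1 else "") + ")"
--     for rs, re in page:
--         result += "\n\n" + _number_block(all_lines[rs:re], rs + 1)
--
--     shown = offset + len(page)
--     if shown < total_groups:
--         result += (
--             "\n\n... limited (" + str(shown) + "/" + str(total_groups) + "). "
--             + "offset=" + str(shown) + " to see more match groups"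
--         )
--     return result
-- ===== Notes on version B (the rewrite author's own statement) =====
-- stated objective: alternative
-- what changed: Regions are produced front-to-back by a two-pointer scan that groups matches lying within 2*ctx_n+1 of each other into one clamped region each, instead of A's rewriting of the last element of the regions list; match indices use an explicit counter loop, line numbering uses str.rjust in a loop, and the output string is grown by concatenation rather than joining a sections list.
import Mathlib
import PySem

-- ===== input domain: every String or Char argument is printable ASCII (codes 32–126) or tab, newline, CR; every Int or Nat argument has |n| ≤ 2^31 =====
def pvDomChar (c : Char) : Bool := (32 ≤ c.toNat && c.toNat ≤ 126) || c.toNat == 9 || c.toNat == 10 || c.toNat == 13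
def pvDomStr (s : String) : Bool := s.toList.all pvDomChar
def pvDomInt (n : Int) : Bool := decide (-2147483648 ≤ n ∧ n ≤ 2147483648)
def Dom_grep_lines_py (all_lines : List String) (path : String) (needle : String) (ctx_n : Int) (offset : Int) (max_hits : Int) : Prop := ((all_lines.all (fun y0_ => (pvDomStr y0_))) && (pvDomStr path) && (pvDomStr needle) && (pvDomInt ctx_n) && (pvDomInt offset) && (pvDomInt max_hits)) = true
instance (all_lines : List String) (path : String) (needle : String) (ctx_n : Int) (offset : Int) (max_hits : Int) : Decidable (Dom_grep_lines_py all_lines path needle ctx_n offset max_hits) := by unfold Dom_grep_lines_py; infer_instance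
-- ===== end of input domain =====

-- B builds the regions front-to-back with a two-pointer scan over the match indices
-- (one clamped region per cluster of matches within 2*ctx_n+1 of each other) instead of
-- A's rewriting of the last region, and assembles the output by string concatenation
-- instead of joining a sections list; same output (alternative decomposition, no speed claim).

-- ===== PORT A =====
-- A's helpers verbatim (_limited / _number_lines); strings are built at the
-- List Char level (PySem.Chars) so the kernel can evaluate them.

-- f"\n\n... limited ({shown}/{total}). {hint}"
def pvLimitedC (shown : Int) (totalG : Int) (hint : List Char) : List Char :=
  "\n\n... limited (".toList ++ PySem.Int.toChars shown ++ "/".toList ++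
    PySem.Int.toChars totalG ++ "). ".toList ++ hint

-- f"{n:{width}d}" for an int n: right-align str(n) in `width` with spaces (exact for ints)
def pvRJustC (s : List Char) (w : Nat) : List Char := List.replicate (w - s.length) ' ' ++ s

-- _number_lines(lines, start)
def pvNumberLinesC (lines : List String) (start : Int) : List Char :=
  let endN : Int := start + lines.length
  let width : Nat := (PySem.Int.toChars endN).length
  PySem.Chars.join ['\n'] ((PySem.List.enumerate lines 0).map (fun p =>
    pvRJustC (PySem.Int.toChars (start + p.1)) width ++ ('│' :: ' ' :: p.2.toList)))

def grep_lines_py (all_lines : List String) (path : String) (needle : String) (ctx_n : Int) (offset : Int) (max_hits : Int) : String :=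
  let total : Int := all_lines.length
  let match_indices : List Int :=
    ((PySem.List.enumerate all_lines 0).filter
      (fun p => PySem.Str.isIn needle (PySem.Str.lower p.2))).map (fun p => p.1)
  if match_indices = [] then
    String.ofList ("No matches for '".toList ++ needle.toList ++ "' in '".toList ++ path.toList ++ "'.".toList)
  else
    -- Build merged context regions.
    let regions : List (Int × Int) := match_indices.foldl (fun regions idx =>
      let region_start := max (idx - ctx_n) 0
      let region_end := min (idx + ctx_n + 1) total
      match regions.getLast? with
      | some last =>
          if region_start ≤ last.2 then regions.dropLast ++ [(last.1, region_end)]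
          else regions ++ [(region_start, region_end)]
      | none => regions ++ [(region_start, region_end)]) []
    -- Paginate by match group (region).
    let total_groups : Int := regions.length
    let page := PySem.List.slice regions (some offset) (some (offset + max_hits))
    if page = [] then
      String.ofList ("Offset ".toList ++ PySem.Int.toChars offset ++ " exceeds ".toList ++
        PySem.Int.toChars total_groups ++ " match groups.".toList)
    else
      let n_matches : Int := match_indices.length
      let header : List Char := "# ".toList ++ path.toList ++ "  (".toList ++
        PySem.Int.toChars n_matches ++ " match".toList ++
        (if n_matches ≠ 1 then "es".toList else "".toList) ++ ")".toList
      let sections : List (List Char) := page.foldl (fun secs r =>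
        secs ++ [pvNumberLinesC (PySem.List.slice all_lines (some r.1) (some r.2)) (r.1 + 1)]) [header]
      let result := PySem.Chars.join "\n\n".toList sections
      let shown : Int := offset + page.length
      if shown < total_groups then
        String.ofList (result ++ pvLimitedC shown total_groups
          ("offset=".toList ++ PySem.Int.toChars shown ++ " to see more match groups".toList))
      else String.ofList result

-- ===== PORT B =====
-- the counter loop collecting match indices
def pvMatchIdxB (needle : String) : Int → List String → List Int
  | _, [] => []
  | i, l :: ls =>
      if PySem.Str.isIn needle (PySem.Str.lower l) then i :: pvMatchIdxB needle (i + 1) ls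
      else pvMatchIdxB needle (i + 1) ls

-- the two-pointer scan: extend the current cluster [first..prev] while the next match is
-- within 2*ctx_n+1, otherwise emit its clamped region and start a new cluster
def pvRegionsB (c total : Int) (first prev : Int) : List Int → List (Int × Int)
  | [] => [(max (first - c) 0, min (prev + c + 1) total)]
  | x :: xs =>
      if x - prev ≤ 2 * c + 1 then pvRegionsB c total first x xs
      else (max (first - c) 0, min (prev + c + 1) total) :: pvRegionsB c total x x xs

-- _number_block: str(n).rjust(width) per row, rows collected then joined
def pvRowsB (width : Nat) : Int → List String → List (List Char)
  | _, [] => []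
  | n, l :: ls =>
      (List.leftpad width ' ' (PySem.Int.toChars n) ++ ('│' :: ' ' :: l.toList)) ::
        pvRowsB width (n + 1) ls

def pvNumBlockB (lines : List String) (start : Int) : List Char :=
  let width : Nat := (PySem.Int.toChars (start + lines.length)).length
  List.intercalate ['\n'] (pvRowsB width start lines)

def grep_lines_py_alt (all_lines : List String) (path : String) (needle : String) (ctx_n : Int) (offset : Int) (max_hits : Int) : String :=
  let total : Int := all_lines.length
  let match_indices : List Int := pvMatchIdxB needle 0 all_lines
  let n_matches : Int := match_indices.length
  match match_indices with
  | [] =>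
    String.ofList ("No matches for '".toList ++ needle.toList ++ "' in '".toList ++ path.toList ++ "'.".toList)
  | m0 :: rest =>
    let regions : List (Int × Int) := pvRegionsB ctx_n total m0 m0 rest
    let total_groups : Int := regions.length
    let page := PySem.List.slice regions (some offset) (some (offset + max_hits))
    if page = [] then
      String.ofList ("Offset ".toList ++ PySem.Int.toChars offset ++ " exceeds ".toList ++
        PySem.Int.toChars total_groups ++ " match groups.".toList)
    else
      let result : List Char := page.foldl (fun acc r =>
          acc ++ "\n\n".toList ++ pvNumBlockB (PySem.List.slice all_lines (some r.1) (some r.2)) (r.1 + 1))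
        ("# ".toList ++ path.toList ++ "  (".toList ++ PySem.Int.toChars n_matches ++
          " match".toList ++ (if n_matches ≠ 1 then "es".toList else "".toList) ++ ")".toList)
      let shown : Int := offset + page.length
      if shown < total_groups then
        String.ofList (result ++ "\n\n... limited (".toList ++ PySem.Int.toChars shown ++
          "/".toList ++ PySem.Int.toChars total_groups ++ "). ".toList ++ "offset=".toList ++
          PySem.Int.toChars shown ++ " to see more match groups".toList)
      else String.ofList result

-- ===== PRECONDITION & SPEC =====
def Spec_grep_lines_py (all_lines : List String) (path : String) (needle : String) (ctx_n : Int) (offset : Int) (max_hits : Int) (out : String) : Prop := out = grep_lines_py_alt all_lines path needle ctx_n offset max_hits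
instance (all_lines : List String) (path : String) (needle : String) (ctx_n : Int) (offset : Int) (max_hits : Int) (out : String) : Decidable (Spec_grep_lines_py all_lines path needle ctx_n offset max_hits out) := by unfold Spec_grep_lines_py; infer_instance

-- ===== CLAIM (what is proved, stated in full; the proofs are below) =====
def Claim_equal_grep_lines_py : Prop := ∀ (all_lines : List String) (path : String) (needle : String) (ctx_n : Int) (offset : Int) (max_hits : Int), Dom_grep_lines_py all_lines path needle ctx_n offset max_hits → Spec_grep_lines_py all_lines path needle ctx_n offset max_hits (grep_lines_py all_lines path needle ctx_n offset max_hits)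

-- ===== LEMMAS AND PROOFS =====

-- A's merge step and the clamped region of a cluster, named for the induction.
def pvStepA (c total : Int) (regions : List (Int × Int)) (idx : Int) : List (Int × Int) :=
  let region_start := max (idx - c) 0
  let region_end := min (idx + c + 1) total
  match regions.getLast? with
  | some last =>
      if region_start ≤ last.2 then regions.dropLast ++ [(last.1, region_end)]
      else regions ++ [(region_start, region_end)]
  | none => regions ++ [(region_start, region_end)]

def pvToR (c total : Int) (cl : Int × Int) : Int × Int :=
  (max (cl.1 - c) 0, min (cl.2 + c + 1) total)

-- B's match-index loop equals A's enumerate/filter/map comprehension.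
theorem pvMatchIdxB_eq (needle : String) :
    ∀ (xs : List String) (s : Int),
      pvMatchIdxB needle s xs =
        ((PySem.List.enumerate xs s).filter
          (fun p => PySem.Str.isIn needle (PySem.Str.lower p.2))).map (fun p => p.1) := by
  intro xs
  induction xs with
  | nil => intro s; simp [pvMatchIdxB, PySem.List.enumerate_nil]
  | cons l ls ih =>
      intro s
      rw [PySem.List.enumerate_cons]
      simp only [pvMatchIdxB, List.filter_cons]
      by_cases h : PySem.Str.isIn needle (PySem.Str.lower l) = true
      · simp only [h, if_true, List.map_cons, ih (s + 1)]
      · simp only [h, Bool.false_eq_true, if_false, ih (s + 1)]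

-- Core invariant: A's interval-merging fold equals B's front-to-back cluster scan,
-- for a strictly increasing list of indices in [0, total).
theorem pvRegions_eq (c total : Int) :
    ∀ (rest : List Int) (acc : List (Int × Int)) (f p : Int),
      0 ≤ f → f ≤ p → p < total → (p :: rest).Pairwise (· < ·) →
      (∀ x ∈ rest, x < total) →
      rest.foldl (pvStepA c total) (acc ++ [pvToR c total (f, p)]) =
        acc ++ pvRegionsB c total f p rest := by
  intro rest
  induction rest with
  | nil =>
      intro acc f p _ _ _ _ _
      simp [pvRegionsB, pvToR]
  | cons a rest ih =>
      intro acc f p hf hfp hpt hpw hbnd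
      have hpa : p < a := (List.pairwise_cons.mp hpw).1 a (by simp)
      have hat : a < total := hbnd a (by simp)
      have hpw' : (a :: rest).Pairwise (· < ·) := (List.pairwise_cons.mp hpw).2
      have hbnd' : ∀ x ∈ rest, x < total := fun x hx => hbnd x (by simp [hx])
      simp only [List.foldl_cons]
      have hA : pvStepA c total (acc ++ [pvToR c total (f, p)]) a =
          if 2 * c + 1 < a - p then
            (acc ++ [pvToR c total (f, p)]) ++ [pvToR c total (a, a)]
          else acc ++ [pvToR c total (f, a)] := by
        simp only [pvStepA, List.getLast?_concat, List.dropLast_concat]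
        have hcond : (max (a - c) 0 ≤ (pvToR c total (f, p)).2) ↔ ¬ (2 * c + 1 < a - p) := by
          simp only [pvToR]
          omega
        by_cases h : 2 * c + 1 < a - p
        · rw [if_neg (by rw [hcond]; simp [h]), if_pos h]
          simp [pvToR]
        · rw [if_pos (hcond.mpr h), if_neg h]
          simp [pvToR]
      rw [hA]
      by_cases h : 2 * c + 1 < a - p
      · rw [if_pos h]
        have hB : pvRegionsB c total f p (a :: rest) =
            pvToR c total (f, p) :: pvRegionsB c total a a rest := by
          simp only [pvRegionsB]
          rw [if_neg (by omega)]
          rfl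
        rw [hB, ih (acc ++ [pvToR c total (f, p)]) a a (by omega) le_rfl hat hpw' hbnd']
        simp
      · rw [if_neg h]
        have hB : pvRegionsB c total f p (a :: rest) = pvRegionsB c total f a rest := by
          simp only [pvRegionsB]
          rw [if_pos (by omega)]
        rw [hB, ih acc f a hf (by omega) hat hpw' hbnd']

-- The match-index list is strictly increasing and bounded by the number of lines.
theorem pvMatchIdx_sorted (xs : List String) (q : Int × String → Bool) :
    (((PySem.List.enumerate xs 0).filter q).map (fun p => p.1)).Pairwise (· < ·) := by
  exact List.Pairwise.map (R := fun (p q' : Int × String) => p.1 < q'.1)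
    (fun p => p.1) (fun _ _ h => h)
    ((PySem.List.pairwise_lt_enumerate xs 0).filter q)

theorem pvMatchIdx_bounds (xs : List String) (q : Int × String → Bool) :
    ∀ x ∈ ((PySem.List.enumerate xs 0).filter q).map (fun p => p.1),
      0 ≤ x ∧ x < (xs.length : Int) := by
  intro x hx
  obtain ⟨p, hp, rfl⟩ := List.mem_map.mp hx
  obtain ⟨k, hk, rfl⟩ := (PySem.List.mem_enumerate_iff xs 0 p).mp (List.mem_of_mem_filter hp)
  refine ⟨by simp, by simp; omega⟩

-- Chars.join is List.intercalate.
theorem pvJoin_eq_intercalate (sep : List Char) :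
    ∀ xs : List (List Char), PySem.Chars.join sep xs = List.intercalate sep xs := by
  intro xs
  induction xs with
  | nil => simp [PySem.Chars.join_nil, List.intercalate]
  | cons a l ih =>
      cases l with
      | nil => simp [PySem.Chars.join_singleton, List.intercalate]
      | cons b l' =>
          rw [PySem.Chars.join_cons_cons, ih]
          simp [List.intercalate, List.intersperse]

-- B's row loop equals A's enumerate-based comprehension (rjust = leftpad).
theorem pvRowsB_eq (w : Nat) :
    ∀ (lines : List String) (n : Int) (k : Int),
      pvRowsB w (n + k) lines =
        (PySem.List.enumerate lines k).map (fun p =>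
          pvRJustC (PySem.Int.toChars (n + p.1)) w ++ ('│' :: ' ' :: p.2.toList)) := by
  intro lines
  induction lines with
  | nil => intro n k; simp [pvRowsB, PySem.List.enumerate_nil]
  | cons l ls ih =>
      intro n k
      rw [PySem.List.enumerate_cons]
      simp only [pvRowsB, List.map_cons]
      rw [show n + k + 1 = n + (k + 1) by ring, ih n (k + 1)]
      rfl

-- The two _number_lines variants agree.
theorem pvNumBlock_eq (lines : List String) (start : Int) :
    pvNumberLinesC lines start = pvNumBlockB lines start := by
  unfold pvNumberLinesC pvNumBlockB
  rw [pvJoin_eq_intercalate]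
  congr 1
  have := pvRowsB_eq ((PySem.Int.toChars (start + lines.length)).length) lines start 0
  rw [show start + (0 : Int) = start by ring] at this
  rw [this]

-- prefix pulls out of the concat-fold
theorem pvFoldl_pre (sep : List Char) (g : (Int × Int) → List Char) :
    ∀ (l : List (Int × Int)) (pre a : List Char),
      pre ++ l.foldl (fun acc x => acc ++ sep ++ g x) a =
        l.foldl (fun acc x => acc ++ sep ++ g x) (pre ++ a) := by
  intro l
  induction l with
  | nil => intro pre a; rfl
  | cons x xs ih =>
      intro pre a
      simp only [List.foldl_cons]
      rw [← ih, ← ih]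
      simp [List.append_assoc]

-- join over header :: blocks = concat-fold starting from the header
theorem pvJoin_eq_foldl (sep : List Char) (g : (Int × Int) → List Char) :
    ∀ (l : List (Int × Int)) (h : List Char),
      PySem.Chars.join sep (h :: l.map g) =
        l.foldl (fun acc x => acc ++ sep ++ g x) h := by
  intro l
  induction l with
  | nil => intro h; simp [PySem.Chars.join_singleton]
  | cons x xs ih =>
      intro h
      simp only [List.map_cons, List.foldl_cons]
      rw [PySem.Chars.join_cons_cons, ih, pvFoldl_pre]

-- ===== VERDICT (by name: the statement is the Claim_ definition above) =====
theorem grep_lines_py_spec : Claim_equal_grep_lines_py := by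
  intro all_lines path needle ctx_n offset max_hits _
  unfold Spec_grep_lines_py grep_lines_py grep_lines_py_alt
  rw [pvMatchIdxB_eq needle all_lines 0]
  set mi := ((PySem.List.enumerate all_lines 0).filter
      (fun p => PySem.Str.isIn needle (PySem.Str.lower p.2))).map (fun p => p.1) with hmi
  cases hmi' : mi with
  | nil => simp
  | cons m0 rest =>
      rw [if_neg (by simp)]
      have hpw := pvMatchIdx_sorted all_lines (fun p => PySem.Str.isIn needle (PySem.Str.lower p.2))
      rw [← hmi, hmi'] at hpw
      have hbd := pvMatchIdx_bounds all_lines (fun p => PySem.Str.isIn needle (PySem.Str.lower p.2))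
      rw [← hmi, hmi'] at hbd
      have hm0 : 0 ≤ m0 ∧ m0 < (all_lines.length : Int) := hbd m0 (by simp)
      have hreg :
          (m0 :: rest).foldl (pvStepA ctx_n all_lines.length) [] =
            pvRegionsB ctx_n all_lines.length m0 m0 rest := by
        have h1 : pvStepA ctx_n all_lines.length [] m0 =
            [] ++ [pvToR ctx_n all_lines.length (m0, m0)] := by
          simp [pvStepA, pvToR]
        rw [List.foldl_cons, h1]
        exact pvRegions_eq ctx_n all_lines.length rest [] m0 m0 hm0.1 le_rfl hm0.2 hpw
          (fun x hx => (hbd x (by simp [hx])).2)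
      show _ = _
      simp only [show (fun (regions : List (Int × Int)) (idx : Int) =>
          let region_start := max (idx - ctx_n) 0
          let region_end := min (idx + ctx_n + 1) (all_lines.length : Int)
          match regions.getLast? with
          | some last =>
              if region_start ≤ last.2 then regions.dropLast ++ [(last.1, region_end)]
              else regions ++ [(region_start, region_end)]
          | none => regions ++ [(region_start, region_end)]) = pvStepA ctx_n all_lines.length
        from rfl]
      rw [hreg]
      -- the sections fold of A = the concat fold of B
      rw [PySem.List.foldl_append_singleton_eq_map, List.singleton_append]
      rw [pvJoin_eq_foldl "\n\n".toList
        (fun r => pvNumberLinesC (PySem.List.slice all_lines (some r.1) (some r.2)) (r.1 + 1))]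
      simp only [pvNumBlock_eq, pvLimitedC, List.append_assoc]
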